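-- pv_equiv track=rewrite | github.com/poojithreddy28/TechnicalPrepDSA | Session14Week7/breakOutProblems.py | is_profitable
-- ===== SOURCE A (Python) =====
-- def is_profitable(excursion_counts, left=None, right=None):
--     if left is None:
--         left = 0
--     if right is None:
--         right = len(excursion_counts)
--
--     if left > right:
--         return -1
--
--     mid = (left + right) // 2
--
--     # Count excursions with at least mid passengers
--     count = sum(1 for x in excursion_counts if x >= mid)
--
--     if count == mid:
--         return mid
--     elif count > mid:
--         return is_profitable(excursion_counts, mid + 1, right)
--     else:  # count < mid
--         return is_profitable(excursion_counts, left, mid - 1)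
-- ===== SOURCE B (Python) =====
-- def is_profitable(excursion_counts, left=None, right=None):
--     n = len(excursion_counts)
--     lo = 0 if left is None else left
--     hi = n if right is None else right
--     # bucket counts of values clamped into [0, n]; negatives never matter
--     cnt = {}
--     for x in excursion_counts:
--         if x >= 0:
--             key = n if x >= n else x
--             cnt[key] = cnt.get(key, 0) + 1
--     # suffix scan: total == count(x >= v); the fixed point is unique
--     total = 0
--     ans = -1
--     for v in range(n, -1, -1):
--         total += cnt.get(v, 0)
--         if total == v:
--             ans = v
--             break
--     if ans != -1 and lo <= ans <= hi:
--         return ans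
--     return -1
-- ===== Notes on version B (the rewrite author's own statement) =====
-- stated objective: faster
-- what changed: Replaces A's recursive binary search (an O(n) count at every level) by a single bucket-counting pass over clamped values plus one suffix scan that finds the unique fixed point count(x>=v)==v, then checks it against the requested bounds.
import Mathlib
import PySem

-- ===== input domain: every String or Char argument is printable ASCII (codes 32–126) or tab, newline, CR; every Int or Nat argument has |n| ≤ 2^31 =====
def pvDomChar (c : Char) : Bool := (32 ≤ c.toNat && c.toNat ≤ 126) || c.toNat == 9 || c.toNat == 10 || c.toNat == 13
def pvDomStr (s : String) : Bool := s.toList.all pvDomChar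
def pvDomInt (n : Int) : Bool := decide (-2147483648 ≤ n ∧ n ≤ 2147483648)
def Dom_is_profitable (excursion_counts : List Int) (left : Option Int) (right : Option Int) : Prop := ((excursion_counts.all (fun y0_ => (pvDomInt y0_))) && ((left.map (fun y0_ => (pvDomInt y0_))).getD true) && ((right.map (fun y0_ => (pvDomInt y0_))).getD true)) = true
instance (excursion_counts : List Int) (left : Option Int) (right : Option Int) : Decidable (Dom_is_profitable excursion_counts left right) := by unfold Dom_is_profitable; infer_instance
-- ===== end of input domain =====

-- B replaces A's recursive binary search (an O(n) count per level) by one bucket-counting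
-- pass plus a suffix scan finding the unique fixed point count(x>=v)==v (objective: faster).

-- termination facts for aRec (cited by name in decreasing_by to keep the proof terms small)
theorem aRec_dec_right {l r mid : Int} (h : l ≤ mid ∧ mid ≤ r) :
    (r - (mid + 1) + 1).toNat < (r - l + 1).toNat := by omega

theorem aRec_dec_left {l r mid : Int} (h : l ≤ mid ∧ mid ≤ r) :
    ((mid - 1) - l + 1).toNat < (r - l + 1).toNat := by omega

-- ===== PORT A =====
-- recursive core of A (the recursion after both None defaults are resolved; ints only)
def aRec (excursion_counts : List Int) (l r : Int) : Int :=
  if l > r then -1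
  else
    let mid := PySem.Int.floordiv (l + r) 2
    let count : Int := excursion_counts.foldl (fun acc x => if mid ≤ x then acc + 1 else acc) 0
    if count = mid then mid
    else if count > mid then aRec excursion_counts (mid + 1) r
    else aRec excursion_counts l (mid - 1)
termination_by (r - l + 1).toNat
decreasing_by
  · exact aRec_dec_right (PySem.Int.floordiv_two_mid_bounds (by omega))
  · exact aRec_dec_left (PySem.Int.floordiv_two_mid_bounds (by omega))

def is_profitable (excursion_counts : List Int) (left : Option Int) (right : Option Int) : Int :=
  let l := left.getD 0
  let r := right.getD (excursion_counts.length : Int)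
  aRec excursion_counts l r

-- ===== PORT B =====
-- the 'for v in range(n, -1, -1)' suffix scan with early break (v counts down)
def bScan (cnt : PySem.Dict Int Int) : Nat → Int → Int
  | v, total =>
    let t := total + cnt.getD (v : Int) 0
    if t = (v : Int) then (v : Int)
    else
      match v with
      | 0 => -1
      | Nat.succ w => bScan cnt w t

def is_profitable_alt (excursion_counts : List Int) (left : Option Int) (right : Option Int) : Int :=
  let n : Int := (excursion_counts.length : Int)
  let lo := left.getD 0
  let hi := right.getD n
  let cnt : PySem.Dict Int Int :=
    excursion_counts.foldl
      (fun d x =>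
        if 0 ≤ x then
          let key := if n ≤ x then n else x
          d.modify key 0 (· + 1)
        else d)
      PySem.Dict.empty
  let ans := bScan cnt excursion_counts.length 0
  if ans ≠ -1 ∧ lo ≤ ans ∧ ans ≤ hi then ans else -1

-- ===== PRECONDITION & SPEC =====
def Spec_is_profitable (excursion_counts : List Int) (left : Option Int) (right : Option Int) (out : Int) : Prop := out = is_profitable_alt excursion_counts left right
instance (excursion_counts : List Int) (left : Option Int) (right : Option Int) (out : Int) : Decidable (Spec_is_profitable excursion_counts left right out) := by unfold Spec_is_profitable; infer_instance

-- ===== CLAIM (what is proved, stated in full; the proofs are below) =====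
def Claim_equal_is_profitable : Prop := ∀ (excursion_counts : List Int) (left : Option Int) (right : Option Int), Dom_is_profitable excursion_counts left right → Spec_is_profitable excursion_counts left right (is_profitable excursion_counts left right)

-- ===== LEMMAS AND PROOFS =====

-- count(x >= v) as an Int
def cGE (xs : List Int) (v : Int) : Int := (xs.countP (fun x => decide (v ≤ x)) : Int)

-- B's bucket keys: the nonnegative elements clamped to [0, n]
def keyList (xs : List Int) : List Int :=
  (xs.filter (fun x => decide (0 ≤ x))).map
    (fun x => if (xs.length : Int) ≤ x then (xs.length : Int) else x)

-- suffix count over the bucketed keys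
def T (xs : List Int) (w : Int) : Int := ((keyList xs).countP (fun k => decide (w ≤ k)) : Int)

theorem cGE_nonneg (xs : List Int) (v : Int) : 0 ≤ cGE xs v := by
  simp [cGE]

theorem cGE_le_len (xs : List Int) (v : Int) : cGE xs v ≤ (xs.length : Int) := by
  unfold cGE
  exact_mod_cast List.countP_le_length (p := fun x => decide (v ≤ x)) (l := xs)

theorem cGE_anti (xs : List Int) {v w : Int} (h : v ≤ w) : cGE xs w ≤ cGE xs v := by
  unfold cGE
  have := List.countP_mono_left (l := xs)
    (p := fun x => decide (w ≤ x)) (q := fun x => decide (v ≤ x))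
    (by intro x _ hx; simp at hx ⊢; omega)
  exact_mod_cast this

-- the fixed point of count(x>=v)==v is unique
theorem fix_unique (xs : List Int) {v w : Int} (hv : cGE xs v = v) (hw : cGE xs w = w) : v = w := by
  rcases lt_trichotomy v w with h | h | h
  · have := cGE_anti xs (le_of_lt h); omega
  · exact h
  · have := cGE_anti xs (le_of_lt h); omega

-- any fixed point lies in [0, n]
theorem fix_range (xs : List Int) {v : Int} (hv : cGE xs v = v) :
    0 ≤ v ∧ v ≤ (xs.length : Int) := by
  have h1 := cGE_nonneg xs v
  have h2 := cGE_le_len xs v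
  omega

-- A's counting loop is cGE
theorem aCount_eq (xs : List Int) (mid : Int) :
    xs.foldl (fun acc x => if mid ≤ x then acc + 1 else acc) 0 = cGE xs mid := by
  have := PySem.List.foldl_ite_add_one (l := xs) (p := fun x => mid ≤ x) (a := (0 : Int))
  simpa [cGE] using this

-- A's binary search finds the fixed point when it lies in [l, r]
theorem aRec_of_fix (xs : List Int) (v : Int) (hv : cGE xs v = v) :
    ∀ (k : Nat) (l r : Int), (r - l + 1).toNat = k → l ≤ v → v ≤ r → aRec xs l r = v := by
  intro k
  induction k using Nat.strong_induction_on with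
  | _ k ih =>
    intro l r hk hl hr
    rw [aRec]
    have hlr : ¬ l > r := by omega
    rw [if_neg hlr]
    simp only [aCount_eq]
    have hmid := PySem.Int.floordiv_two_mid_bounds (lo := l) (hi := r) (by omega)
    set mid := PySem.Int.floordiv (l + r) 2 with hmiddef
    by_cases h1 : cGE xs mid = mid
    · rw [if_pos h1]
      exact (fix_unique xs h1 hv)
    · rw [if_neg h1]
      by_cases h2 : cGE xs mid > mid
      · rw [if_pos h2]
        have hvgt : mid + 1 ≤ v := by
          by_contra hle
          have : cGE xs mid ≤ cGE xs v := cGE_anti xs (by omega)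
          omega
        exact ih (r - (mid + 1) + 1).toNat (by omega) (mid + 1) r rfl hvgt hr
      · rw [if_neg h2]
        have hvlt : v ≤ mid - 1 := by
          by_contra hge
          have : cGE xs v ≤ cGE xs mid := cGE_anti xs (by omega)
          omega
        exact ih ((mid - 1) - l + 1).toNat (by omega) l (mid - 1) rfl hl hvlt

-- A's binary search returns -1 when no fixed point lies in [l, r]
theorem aRec_no_fix (xs : List Int) :
    ∀ (k : Nat) (l r : Int), (r - l + 1).toNat = k →
      (∀ u : Int, l ≤ u → u ≤ r → cGE xs u ≠ u) → aRec xs l r = -1 := by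
  intro k
  induction k using Nat.strong_induction_on with
  | _ k ih =>
    intro l r hk hno
    rw [aRec]
    by_cases hlr : l > r
    · rw [if_pos hlr]
    · rw [if_neg hlr]
      simp only [aCount_eq]
      have hmid := PySem.Int.floordiv_two_mid_bounds (lo := l) (hi := r) (by omega)
      set mid := PySem.Int.floordiv (l + r) 2 with hmiddef
      have h1 : cGE xs mid ≠ mid := hno mid (by omega) (by omega)
      rw [if_neg h1]
      by_cases h2 : cGE xs mid > mid
      · rw [if_pos h2]
        exact ih (r - (mid + 1) + 1).toNat (by omega) (mid + 1) r rfl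
          (fun u hu1 hu2 => hno u (by omega) hu2)
      · rw [if_neg h2]
        exact ih ((mid - 1) - l + 1).toNat (by omega) l (mid - 1) rfl
          (fun u hu1 hu2 => hno u hu1 (by omega))

-- splitting an integer suffix count at its lowest value
theorem countP_succ_split (l : List Int) (v : Int) :
    l.countP (fun k => decide (v ≤ k)) = l.countP (fun k => decide (v + 1 ≤ k)) + l.count v := by
  induction l with
  | nil => simp
  | cons a t ih =>
    simp only [List.countP_cons, List.count_cons, ih]
    by_cases h1 : v ≤ a <;> by_cases h2 : v + 1 ≤ a <;> by_cases h3 : a = v <;>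
      simp [h1, h2, h3] <;> omega

theorem T_split (xs : List Int) (v : Int) :
    T xs v = T xs (v + 1) + ((keyList xs).count v : Int) := by
  unfold T
  exact_mod_cast countP_succ_split (keyList xs) v

theorem T_top (xs : List Int) : T xs ((xs.length : Int) + 1) = 0 := by
  unfold T keyList
  simp only [List.countP_map]
  norm_cast
  rw [List.countP_eq_zero]
  intro x hx
  simp only [Function.comp]
  by_cases h : (xs.length : Int) ≤ x <;> simp [h]
  omega

theorem T_eq_cGE (xs : List Int) (w : Int) (h0 : 0 ≤ w) (hn : w ≤ (xs.length : Int)) :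
    T xs w = cGE xs w := by
  unfold T keyList cGE
  rw [List.countP_map, List.countP_filter]
  congr 1
  apply List.countP_congr
  intro x _
  simp only [Function.comp]
  by_cases hx : (0 : Int) ≤ x <;> by_cases hnx : (xs.length : Int) ≤ x <;>
    simp [hx, hnx] <;> omega

-- the bucket dict built by B's first loop is a counter of keyList
theorem cnt_getD (xs : List Int) (v : Int) :
    (xs.foldl
      (fun d x =>
        if 0 ≤ x then
          let key := if (xs.length : Int) ≤ x then (xs.length : Int) else x
          d.modify key 0 (· + 1)
        else d)
      PySem.Dict.empty).getD v 0 = ((keyList xs).count v : Int) := by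
  rw [PySem.List.foldl_ite_eq_foldl_filter]
  rw [show (xs.filter (fun x => decide (0 ≤ x))).foldl
        (fun (d : PySem.Dict Int Int) x =>
          d.modify (if (xs.length : Int) ≤ x then (xs.length : Int) else x) 0 (· + 1))
        PySem.Dict.empty
      = (keyList xs).foldl (fun (d : PySem.Dict Int Int) k => d.modify k 0 (· + 1))
        PySem.Dict.empty from by unfold keyList; rw [List.foldl_map]]
  rw [PySem.Dict.getD_foldl_modify_add_one]
  simp [PySem.Dict.empty, PySem.Dict.getD, PySem.Dict.get?]

-- B's suffix scan finds the fixed point u when u ≤ v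
theorem bScan_fix (xs : List Int) (cnt : PySem.Dict Int Int)
    (hcnt : ∀ w : Int, cnt.getD w 0 = ((keyList xs).count w : Int))
    (u : Nat) (hu : cGE xs (u : Int) = (u : Int)) :
    ∀ v : Nat, u ≤ v → (v : Int) ≤ (xs.length : Int) →
      bScan cnt v (T xs ((v : Int) + 1)) = (u : Int) := by
  intro v
  induction v with
  | zero =>
    intro h0 _
    have hu0 : u = 0 := Nat.le_zero.mp h0
    rw [bScan]
    simp only [hcnt, Nat.cast_zero]
    rw [← T_split]
    have : T xs 0 = 0 := by
      rw [T_eq_cGE xs 0 le_rfl (by positivity)]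
      rw [hu0] at hu; simpa using hu
    simp [this, hu0]
  | succ w ihw =>
    intro hle hn
    rw [bScan]
    simp only [hcnt]
    rw [← T_split]
    push_cast
    rw [T_eq_cGE xs ((w : Int) + 1) (by positivity) (by push_cast at hn ⊢; omega)]
    by_cases hfix : cGE xs ((w : Int) + 1) = ((w : Int) + 1)
    · have : (u : Int) = (w : Int) + 1 := fix_unique xs hu hfix
      rw [if_pos (by omega)]
      omega
    · rw [if_neg hfix]
      have huw : u ≤ w := by
        have : (u : Int) ≠ (w : Int) + 1 := fun h => hfix (h ▸ hu)
        omega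
      have := ihw huw (by push_cast at hn ⊢; omega)
      rw [show cGE xs ((w : Int) + 1) = T xs ((w : Int) + 1) from
        (T_eq_cGE xs ((w : Int) + 1) (by positivity) (by push_cast at hn ⊢; omega)).symm]
      exact this

-- B's suffix scan returns -1 when there is no fixed point at all
theorem bScan_none (xs : List Int) (cnt : PySem.Dict Int Int)
    (hcnt : ∀ w : Int, cnt.getD w 0 = ((keyList xs).count w : Int))
    (hno : ∀ u : Int, cGE xs u ≠ u) :
    ∀ v : Nat, (v : Int) ≤ (xs.length : Int) →
      bScan cnt v (T xs ((v : Int) + 1)) = -1 := by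
  intro v
  induction v with
  | zero =>
    intro _
    rw [bScan]
    simp only [hcnt, Nat.cast_zero]
    rw [← T_split]
    rw [T_eq_cGE xs 0 le_rfl (by positivity)]
    rw [if_neg (hno 0)]
  | succ w ihw =>
    intro hn
    rw [bScan]
    simp only [hcnt]
    rw [← T_split]
    push_cast
    rw [T_eq_cGE xs ((w : Int) + 1) (by positivity) (by push_cast at hn ⊢; omega)]
    rw [if_neg (hno ((w : Int) + 1))]
    have := ihw (by push_cast at hn ⊢; omega)
    rw [show cGE xs ((w : Int) + 1) = T xs ((w : Int) + 1) from
      (T_eq_cGE xs ((w : Int) + 1) (by positivity) (by push_cast at hn ⊢; omega)).symm]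
    exact this

-- ===== VERDICT (by name: the statement is the Claim_ definition above) =====
theorem is_profitable_spec : Claim_equal_is_profitable := by
  unfold Claim_equal_is_profitable
  intro xs left right _
  unfold Spec_is_profitable is_profitable is_profitable_alt
  simp only
  set lo := left.getD 0 with hlo
  set hi := right.getD (xs.length : Int) with hhi
  set cnt := xs.foldl
      (fun (d : PySem.Dict Int Int) x =>
        if 0 ≤ x then
          let key := if (xs.length : Int) ≤ x then (xs.length : Int) else x
          d.modify key 0 (· + 1)
        else d)
      PySem.Dict.empty with hcntdef
  have hcnt : ∀ w : Int, cnt.getD w 0 = ((keyList xs).count w : Int) := fun w => cnt_getD xs w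
  have hstart : (0 : Int) = T xs ((xs.length : Int) + 1) := (T_top xs).symm
  by_cases hex : ∃ u : Int, cGE xs u = u
  · obtain ⟨u, hu⟩ := hex
    obtain ⟨hu0, hun⟩ := fix_range xs hu
    have huN : ((u.toNat : Int)) = u := Int.toNat_of_nonneg hu0
    have hans : bScan cnt xs.length 0 = u := by
      rw [hstart]
      rw [show ((xs.length : Int)) = ((xs.length : Nat) : Int) from rfl]
      rw [← huN]
      exact bScan_fix xs cnt hcnt u.toNat (by rw [huN]; exact hu) xs.length
        (by omega) (by omega)
    rw [hans]
    by_cases hin : lo ≤ u ∧ u ≤ hi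
    · rw [if_pos ⟨by omega, hin.1, hin.2⟩]
      exact aRec_of_fix xs u hu (hi - lo + 1).toNat lo hi rfl hin.1 hin.2
    · rw [if_neg (by intro h; exact hin ⟨h.2.1, h.2.2⟩)]
      apply aRec_no_fix xs (hi - lo + 1).toNat lo hi rfl
      intro w hw1 hw2 hwfix
      have : w = u := fix_unique xs hwfix hu
      subst this
      exact hin ⟨hw1, hw2⟩
  · simp only [not_exists] at hex
    have hans : bScan cnt xs.length 0 = -1 := by
      rw [hstart]
      exact bScan_none xs cnt hcnt hex xs.length le_rfl
    rw [hans]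
    rw [if_neg (by intro h; exact h.1 rfl)]
    apply aRec_no_fix xs (hi - lo + 1).toNat lo hi rfl
    intro w _ _ h
    exact hex w h
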